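-- pv_equiv track=rewrite | github.com/IvanZabelin/max7219-raspberry-pi-clock | led_clock.py | small35_text_size
-- ===== SOURCE A (Python) =====
-- DIGITS_3x5 = {
--     "0": ["111", "101", "101", "101", "111"],
--     "1": ["010", "110", "010", "010", "111"],
--     "2": ["111", "001", "111", "100", "111"],
--     "3": ["111", "001", "111", "001", "111"],
--     "4": ["101", "101", "111", "001", "001"],
--     "5": ["111", "100", "111", "001", "111"],
--     "6": ["111", "100", "111", "101", "111"],
--     "7": ["111", "001", "010", "100", "100"],
--     "8": ["111", "101", "111", "101", "111"],
--     "9": ["111", "101", "111", "001", "111"],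
--     "-": ["000", "000", "111", "000", "000"],
--     "C": ["111", "100", "100", "100", "111"],
-- }
--
-- def small35_text_size(txt: str, spacing: int = 1):
--     """Compute width/height of 3x5 text."""
--     w = 0
--     for i, ch in enumerate(txt):
--         if ch in DIGITS_3x5:
--             w += 3
--             if i != len(txt) - 1:
--                 w += spacing
--     return w, 5
-- ===== SOURCE B (Python) =====
-- GLYPHS = set("0123456789-C")
--
-- def small35_text_size(txt: str, spacing: int = 1):
--     """Compute width/height of 3x5 text (closed form)."""
--     c = sum(1 for ch in txt if ch in GLYPHS)
--     last = 1 if txt and txt[-1] in GLYPHS else 0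
--     return 3 * c + spacing * (c - last), 5
-- ===== Notes on version B (the rewrite author's own statement) =====
-- stated objective: simpler
-- what changed: Replaces the per-character positional branch inside the loop by a single glyph count plus a closed-form arithmetic correction for the final character (spacing is withheld only when the string's last character is a glyph).
import Mathlib
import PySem

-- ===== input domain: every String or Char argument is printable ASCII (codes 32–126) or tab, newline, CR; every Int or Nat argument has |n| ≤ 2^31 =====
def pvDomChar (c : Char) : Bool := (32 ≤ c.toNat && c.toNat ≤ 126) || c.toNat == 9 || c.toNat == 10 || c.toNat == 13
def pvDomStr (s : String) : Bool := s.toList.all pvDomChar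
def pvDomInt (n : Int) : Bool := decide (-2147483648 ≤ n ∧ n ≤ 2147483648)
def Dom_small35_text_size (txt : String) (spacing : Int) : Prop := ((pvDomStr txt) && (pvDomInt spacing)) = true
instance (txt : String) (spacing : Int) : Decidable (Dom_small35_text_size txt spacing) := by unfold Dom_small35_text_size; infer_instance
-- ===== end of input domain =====

-- B replaces the per-character positional branch by a glyph count and a closed-form
-- correction for the final character (objective: simpler).


-- ===== PORT A =====
-- keys of DIGITS_3x5 ('ch in DIGITS_3x5' tests key membership)
def digitKeys : List Char :=
  ['0', '1', '2', '3', '4', '5', '6', '7', '8', '9', '-', 'C']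

def small35_text_size (txt : String) (spacing : Int) : Int × Int :=
  let cs := txt.toList
  let w := (PySem.List.enumerate cs).foldl
    (fun w p =>
      if digitKeys.contains p.2 then
        let w := w + 3
        if p.1 ≠ (cs.length : Int) - 1 then w + spacing else w
      else w) 0
  (w, 5)

-- ===== PORT B =====
-- GLYPHS = set("0123456789-C")
def glyphsB : PySem.Set Char := PySem.Set.ofList "0123456789-C".toList

def small35_text_size_alt (txt : String) (spacing : Int) : Int × Int :=
  let cs := txt.toList
  let c : Int := (cs.filter (fun ch => glyphsB.contains ch)).length
  -- 'txt and txt[-1] in GLYPHS': txt[-1] on a nonempty string is its last character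
  let last : Int :=
    match PySem.Str.pyGet? txt (-1) with
    | some ch => if glyphsB.contains ch then 1 else 0
    | none => 0
  (3 * c + spacing * (c - last), 5)

-- ===== PRECONDITION & SPEC =====
def Spec_small35_text_size (txt : String) (spacing : Int) (out : Int × Int) : Prop := out = small35_text_size_alt txt spacing
instance (txt : String) (spacing : Int) (out : Int × Int) : Decidable (Spec_small35_text_size txt spacing out) := by unfold Spec_small35_text_size; infer_instance

-- ===== CLAIM (what is proved, stated in full; the proofs are below) =====
def Claim_equal_small35_text_size : Prop := ∀ (txt : String) (spacing : Int), Dom_small35_text_size txt spacing → Spec_small35_text_size txt spacing (small35_text_size txt spacing)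

-- ===== LEMMAS AND PROOFS =====

lemma glyphsB_contains_eq (ch : Char) :
    glyphsB.contains ch = digitKeys.contains ch := by
  have h : (glyphsB : List Char) = digitKeys := by decide
  simp [PySem.Set.contains, h]

def cntG (xs : List Char) : Int := ((xs.filter (fun ch => digitKeys.contains ch)).length : Int)

def lastG (xs : List Char) : Int :=
  match xs.getLast? with
  | some ch => if digitKeys.contains ch then 1 else 0
  | none => 0

lemma fold_enum (spacing n : Int) :
    ∀ (xs : List Char) (i w : Int), i + xs.length = n →
    (PySem.List.enumerate xs i).foldl
      (fun w p =>
        if digitKeys.contains p.2 then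
          let w := w + 3
          if p.1 ≠ n - 1 then w + spacing else w
        else w) w
    = w + 3 * cntG xs + spacing * (cntG xs - lastG xs) := by
  intro xs
  induction xs with
  | nil => intro i w h; simp [PySem.List.enumerate, cntG, lastG]
  | cons x rest ih =>
    intro i w h
    rw [PySem.List.enumerate_cons]
    cases rest with
    | nil =>
      have hi : i = n - 1 := by simp at h; omega
      by_cases hv : x ∈ digitKeys <;>
        simp [PySem.List.enumerate, hi, cntG, lastG, hv]
    | cons y ys =>
      have hne : i ≠ n - 1 := by
        simp [List.length_cons] at h; omega
      have h' : (i + 1) + ((y :: ys).length : Int) = n := by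
        simp [List.length_cons] at h ⊢; omega
      have hlast : lastG (x :: y :: ys) = lastG (y :: ys) := by
        simp [lastG, List.getLast?_cons_cons]
      by_cases hv : x ∈ digitKeys
      · rw [List.foldl_cons, ih (i + 1) _ h']
        simp [List.contains_eq_mem, hv, hne, cntG, hlast, List.filter_cons]
        ring
      · rw [List.foldl_cons, ih (i + 1) _ h']
        simp [List.contains_eq_mem, hv, cntG, hlast, List.filter_cons]

lemma last_eq (txt : String) :
    (match PySem.Str.pyGet? txt (-1) with
      | some ch => if glyphsB.contains ch then (1 : Int) else 0
      | none => 0) = lastG txt.toList := by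
  simp only [glyphsB_contains_eq]
  simp only [PySem.Str.pyGet?, PySem.Chars.pyGet?_eq_listPyGet?,
    PySem.List.pyGet?_neg_one, lastG]

-- ===== VERDICT (by name: the statement is the Claim_ definition above) =====
theorem small35_text_size_spec : Claim_equal_small35_text_size := by
  intro txt spacing _
  unfold Spec_small35_text_size small35_text_size small35_text_size_alt
  simp only []
  rw [fold_enum spacing (txt.toList.length : Int) txt.toList 0 0 (by simp)]
  rw [last_eq]
  simp only [glyphsB_contains_eq, cntG]
  ring_nf
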